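-- pv_equiv track=rewrite | github.com/YangLiyli131/Leetcode2020 | in_Python/0953 Verifying an Alien Dictionary.py | isSmaller
-- ===== SOURCE A (Python) =====
-- def isSmaller(a,b,order):
--     i,j = 0,0
--     while i < len(a) and j < len(b):
--         x = order.index(a[i])
--         y = order.index(b[j])
--         if x > y:
--             return False
--         if x < y:
--             return True
--         i += 1
--         j += 1
--     if i < len(a):
--         return False
--     return True
-- ===== SOURCE B (Python) =====
-- def isSmaller(a, b, order):
--     ra = [order.find(c) for c in a]
--     rb = [order.find(c) for c in b]
--     return ra <= rb
-- ===== Notes on version B (the rewrite author's own statement) =====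
-- stated objective: simpler
-- what changed: B translates each whole word into its rank sequence with str.find and decides with one native lexicographic list comparison (ra <= rb), replacing A's interleaved early-exit two-index while loop.
import Mathlib
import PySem

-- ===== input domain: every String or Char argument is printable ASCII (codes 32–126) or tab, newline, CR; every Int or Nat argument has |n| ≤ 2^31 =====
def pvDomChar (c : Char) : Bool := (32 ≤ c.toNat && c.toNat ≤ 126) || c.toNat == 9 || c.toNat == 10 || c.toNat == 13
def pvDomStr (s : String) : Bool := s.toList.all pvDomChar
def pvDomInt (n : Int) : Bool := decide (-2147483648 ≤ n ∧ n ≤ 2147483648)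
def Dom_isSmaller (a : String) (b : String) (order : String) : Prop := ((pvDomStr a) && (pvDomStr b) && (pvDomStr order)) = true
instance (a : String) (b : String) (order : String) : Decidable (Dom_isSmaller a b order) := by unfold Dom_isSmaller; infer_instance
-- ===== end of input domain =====

-- B builds both full rank sequences with str.find and decides with one lexicographic list
-- comparison, replacing A's interleaved early-exit two-index loop (simpler, total).

-- ===== PORT A =====
-- A's while-loop: i and j advance in lockstep, so it is structural recursion on both lists.
-- order.index(c) raises ValueError when c ∉ order (excluded by Pre_); .getD 0 is never hit inside Pre_.
def isSmallerGo (lo : List Char) : List Char → List Char → Bool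
  | x :: xs, y :: ys =>
      let xi := (PySem.List.index? lo x).getD 0
      let yi := (PySem.List.index? lo y).getD 0
      if xi > yi then false
      else if xi < yi then true
      else isSmallerGo lo xs ys
  | la, _ => if la.length > 0 then false else true

def isSmaller (a : String) (b : String) (order : String) : Bool :=
  isSmallerGo order.toList a.toList b.toList

-- ===== PORT B =====
-- Source B's rank sequence: [order.find(c) for c in w] (find = -1 for absent characters).
def rankSeq (lo : List Char) (w : List Char) : List Int :=
  w.map (fun c => PySem.Chars.find lo [c])

-- Python's native `<=` on lists of ints: first unequal element decides, else length order.
def pyListLe : List Int → List Int → Bool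
  | [], _ => true
  | _ :: _, [] => false
  | x :: xs, y :: ys => if x < y then true else if y < x then false else pyListLe xs ys

def isSmaller_alt (a : String) (b : String) (order : String) : Bool :=
  pyListLe (rankSeq order.toList a.toList) (rankSeq order.toList b.toList)

-- ===== PRECONDITION & SPEC =====
-- Pre_ is exactly the set of inputs on which Python A returns normally: every position the
-- loop reaches before deciding (i.e. every position whose preceding characters all agree)
-- carries characters of both words that occur in order; elsewhere A raises ValueError.
def Pre_isSmaller (a : String) (b : String) (order : String) : Prop :=
  ∀ t, t < min a.toList.length b.toList.length →
    a.toList.take t = b.toList.take t →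
      order.toList.contains (a.toList.getD t ' ') = true ∧
      order.toList.contains (b.toList.getD t ' ') = true
instance (a : String) (b : String) (order : String) : Decidable (Pre_isSmaller a b order) := by
  unfold Pre_isSmaller; infer_instance

def pvWitness_isSmaller : String × String × String := ("ab", "ba", "ab")

def Spec_isSmaller (a : String) (b : String) (order : String) (out : Bool) : Prop := out = isSmaller_alt a b order
instance (a : String) (b : String) (order : String) (out : Bool) : Decidable (Spec_isSmaller a b order out) := by unfold Spec_isSmaller; infer_instance

-- ===== CLAIM (what is proved, stated in full; the proofs are below) =====
def Claim_equal_isSmaller : Prop := ∀ (a : String) (b : String) (order : String), Dom_isSmaller a b order → Pre_isSmaller a b order → Spec_isSmaller a b order (isSmaller a b order)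

-- ===== LEMMAS AND PROOFS =====

-- find on a single character points at its first occurrence, i.e. agrees with index?.
lemma find_singleton_eq_index (lo : List Char) (c : Char) (hc : c ∈ lo) :
    PySem.Chars.find lo [c] = ((PySem.List.index? lo c).getD 0 : Int) := by
  obtain ⟨k, hk⟩ : ∃ k, PySem.List.index? lo c = some k :=
    Option.isSome_iff_exists.mp ((PySem.List.index?_isSome_iff lo c).mpr hc)
  obtain ⟨hklt, hkc, hkmin⟩ := PySem.List.getElem_of_index?_eq_some hk
  have hinfix : [c] <:+: lo := by
    rw [List.infix_iff_prefix_suffix]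
    refine ⟨lo.drop k, ⟨lo.drop (k+1), ?_⟩, List.drop_suffix k lo⟩
    simp [List.drop_eq_getElem_cons hklt, hkc]
  have hnn : 0 ≤ PySem.Chars.find lo [c] := (PySem.Chars.find_nonneg_iff lo [c]).mpr hinfix
  obtain ⟨hpre, hmin⟩ := PySem.Chars.find_spec hnn
  set f : Nat := (PySem.Chars.find lo [c]).toNat with hf
  have hflen : PySem.Chars.find lo [c] ≤ lo.length := PySem.Chars.find_le_length lo [c]
  -- from the prefix: lo[f]? = some c
  have hfc : lo[f]? = some c := by
    obtain ⟨t, ht⟩ := hpre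
    have : (lo.drop f).head? = some c := by rw [← ht]; rfl
    rwa [List.head?_drop] at this
  have hflt : f < lo.length := by
    by_contra h
    rw [List.getElem?_eq_none (by omega)] at hfc
    simp at hfc
  -- f = k by mutual minimality
  have h1 : ¬ k < f := by
    intro hlt
    have : [c] <+: lo.drop k := by
      refine ⟨lo.drop (k+1), ?_⟩
      rw [List.drop_eq_getElem_cons hklt, hkc]; rfl
    exact hmin k (by omega) this
  have h2 : ¬ f < k := by
    intro hlt
    exact hkmin f hlt (by rwa [List.getElem?_eq_getElem hflt, Option.some_inj] at hfc)
  have : f = k := by omega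
  rw [hk]
  simp only [Option.getD_some]
  omega

-- Distinct characters of order get distinct first-occurrence indices.
lemma index_ne_of_ne (lo : List Char) {x y : Char} (hx : x ∈ lo) (hy : y ∈ lo) (hxy : x ≠ y) :
    (PySem.List.index? lo x).getD 0 ≠ (PySem.List.index? lo y).getD 0 := by
  obtain ⟨ix, hix⟩ := Option.isSome_iff_exists.mp ((PySem.List.index?_isSome_iff lo x).mpr hx)
  obtain ⟨iy, hiy⟩ := Option.isSome_iff_exists.mp ((PySem.List.index?_isSome_iff lo y).mpr hy)
  obtain ⟨hkx, hgx, -⟩ := PySem.List.getElem_of_index?_eq_some hix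
  obtain ⟨hky, hgy, -⟩ := PySem.List.getElem_of_index?_eq_some hiy
  rw [hix, hiy]
  simp only [Option.getD_some]
  intro h
  apply hxy
  subst h
  rw [← hgx, ← hgy]

lemma go_eq_alt (lo : List Char) (la lb : List Char)
    (h : ∀ t, t < min la.length lb.length → la.take t = lb.take t →
        lo.contains (la.getD t ' ') = true ∧ lo.contains (lb.getD t ' ') = true) :
    isSmallerGo lo la lb = pyListLe (rankSeq lo la) (rankSeq lo lb) := by
  induction la generalizing lb with
  | nil => cases lb <;> simp [isSmallerGo, rankSeq, pyListLe]
  | cons x xs ih =>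
    cases lb with
    | nil => simp [isSmallerGo, rankSeq, pyListLe]
    | cons y ys =>
      by_cases hxy : x = y
      · subst hxy
        have hrec : isSmallerGo lo xs ys = pyListLe (rankSeq lo xs) (rankSeq lo ys) := by
          apply ih
          intro t ht hteq
          have := h (t + 1) (by simp; omega) (by simp [hteq])
          simpa using this
        simp [isSmallerGo, rankSeq, pyListLe, hrec]
      · have h0 := h 0 (by simp) (by simp)
        simp only [List.getD_cons_zero, List.contains_iff_mem] at h0
        obtain ⟨hx, hy⟩ := h0
        have hx' : x ∈ lo := by simpa using hx
        have hy' : y ∈ lo := by simpa using hy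
        have hne := index_ne_of_ne lo hx' hy' hxy
        simp only [isSmallerGo, rankSeq, List.map_cons, pyListLe,
          find_singleton_eq_index lo x hx', find_singleton_eq_index lo y hy']
        split_ifs <;> first | rfl | omega

-- ===== VERDICT (by name: the statement is the Claim_ definition above) =====
theorem isSmaller_spec : Claim_equal_isSmaller := by
  intro a b order _ hpre
  unfold Spec_isSmaller isSmaller isSmaller_alt
  exact go_eq_alt _ _ _ hpre
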